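-- pv_equiv track=rewrite | github.com/PeterYoungQaQ/leecode_test | remove-duplicates-from-sorted-array-ii.py | removeDuplicatesHelper
-- ===== SOURCE A (Python) =====
-- def removeDuplicatesHelper(A, n, k):
--     if n <= k:
--         return n
--     lengthIndex = 1
--     cnt = 1
--     for j in range(1, n):
--         if A[j] != A[j - 1]:
--             cnt = 1
--             A[lengthIndex] = A[j]
--             lengthIndex += 1
--         else:
--             if cnt < k:
--                 A[lengthIndex] = A[j]
--                 cnt += 1
--                 lengthIndex += 1
--     return lengthIndex
-- ===== SOURCE B (Python) =====
-- def removeDuplicatesHelper(A, n, k):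
--     if n <= k:
--         return n
--     kept = []
--     i = 0
--     while i < n:
--         run_end = i + 1
--         while run_end < n and A[run_end] == A[i]:
--             run_end += 1
--         kept.extend([A[i]] * min(run_end - i, k))
--         i = run_end
--     A[:len(kept)] = kept
--     return len(kept)
-- ===== Notes on version B (the rewrite author's own statement) =====
-- stated objective: alternative
-- what changed: B replaces A's per-element scan with a run counter by a run-at-a-time grouping pass: it finds each maximal run of equal adjacent elements, keeps min(run_length, k) copies of it, writes the kept prefix back, and returns its length (return-value equivalence; both mutate A in place).
-- intended difference: For k <= 0 with k < n (a nonsensical 'keep at most k' bound) A still keeps one element per run (returning the run count, even 1 when n <= 0), while B keeps min(run,k) = 0 copies and returns 0, the intended 'at most k copies' answer. — e.g. on removeDuplicatesHelper([1, 1], 2, 0): A returns 1, B returns 0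
-- outside the precondition, e.g. on removeDuplicatesHelper([], 1, 0): A returns 1, B raises IndexError
import Mathlib
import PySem

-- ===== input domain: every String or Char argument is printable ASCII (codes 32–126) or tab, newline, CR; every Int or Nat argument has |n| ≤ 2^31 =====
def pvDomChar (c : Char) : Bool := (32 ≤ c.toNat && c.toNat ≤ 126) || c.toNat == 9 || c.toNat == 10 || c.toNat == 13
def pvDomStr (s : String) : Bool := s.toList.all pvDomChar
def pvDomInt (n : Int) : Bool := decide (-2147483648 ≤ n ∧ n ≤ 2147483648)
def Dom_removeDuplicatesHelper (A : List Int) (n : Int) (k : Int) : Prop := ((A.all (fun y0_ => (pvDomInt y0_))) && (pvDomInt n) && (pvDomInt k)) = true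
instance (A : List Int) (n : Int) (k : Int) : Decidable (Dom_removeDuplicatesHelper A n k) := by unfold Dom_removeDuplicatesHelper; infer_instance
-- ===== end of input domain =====

-- B compacts A run-at-a-time (keep min(run,k) copies of each maximal run of equal adjacent
-- elements) instead of A's per-element scan with a run counter; the equivalence proved is about
-- the RETURN value only (both Pythons also mutate A in place).

-- ===== PORT A =====
-- A[i] read (Python raises out of range; Pre_ keeps every read in range, the 0 default unreachable)
def pvGet (A : List Int) (i : Int) : Int := PySem.List.pyGetD A i 0

-- body of A's 'for j in range(1, n)' loop; state = (A, lengthIndex, cnt)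
def aStep (k : Int) (st : List Int × Int × Int) (j : Int) : List Int × Int × Int :=
  if pvGet st.1 j ≠ pvGet st.1 (j - 1) then
    (st.1.set (st.2.1).toNat (pvGet st.1 j), st.2.1 + 1, 1)
  else if st.2.2 < k then
    (st.1.set (st.2.1).toNat (pvGet st.1 j), st.2.1 + 1, st.2.2 + 1)
  else st

def removeDuplicatesHelper (A : List Int) (n : Int) (k : Int) : Int :=
  if n ≤ k then n
  else ((PySem.List.pyRange 1 n 1).foldl (aStep k) (A, 1, 1)).2.1

-- ===== PORT B =====
-- Source B's inner 'while run_end < n and A[run_end] == A[i]' loop; the fuel (n - r).toNat is exactly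
-- the remaining iteration bound, so the recursion is structural and kernel-evaluable
def findEndF (A : List Int) (n i : Int) : Nat → Int → Int
  | 0, r => r
  | fuel + 1, r => if r < n ∧ pvGet A r = pvGet A i then findEndF A n i fuel (r + 1) else r

def findEnd (A : List Int) (n i r : Int) : Int := findEndF A n i (n - r).toNat r

-- Source B's outer 'while i < n' loop: the kept elements from position i on (same fuel device)
def keptFromF (A : List Int) (n k : Int) : Nat → Int → List Int
  | 0, _ => []
  | fuel + 1, i =>
    if i < n then
      List.replicate (min (findEnd A n i (i + 1) - i) k).toNat (pvGet A i)
        ++ keptFromF A n k fuel (findEnd A n i (i + 1))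
    else []

def keptFrom (A : List Int) (n k i : Int) : List Int := keptFromF A n k (n - i).toNat i

def removeDuplicatesHelper_alt (A : List Int) (n : Int) (k : Int) : Int :=
  if n ≤ k then n
  else ((keptFrom A n k 0).length : Int)

-- ===== PRECONDITION & SPEC =====
-- Pre_ excludes exactly the inputs on which a Python raises IndexError: A raises when 2 ≤ n,
-- k < n and n > len(A); B additionally raises at the degenerate n = 1 ∧ A = [] ∧ k < 1 (it reads
-- A[0] there, while A's loop range(1, 1) is empty and returns 1).
def Pre_removeDuplicatesHelper (A : List Int) (n : Int) (k : Int) : Prop :=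
  n ≤ k ∨ n ≤ 0 ∨ n ≤ (A.length : Int)
instance (A : List Int) (n : Int) (k : Int) : Decidable (Pre_removeDuplicatesHelper A n k) := by
  unfold Pre_removeDuplicatesHelper; infer_instance

def pvWitness_removeDuplicatesHelper : List Int × Int × Int := ([1, 1, 2, 2, 2, 3], 6, 2)

-- For k ≤ 0 with k < n (a nonsensical 'keep at most k' bound) A still keeps one element per run
-- (returning the run count, even 1 when n ≤ 0), while B keeps min(run, k) = 0 copies and returns 0,
-- the intended 'at most k copies' answer.
def D_removeDuplicatesHelper (A : List Int) (n : Int) (k : Int) : Prop := k ≤ 0 ∧ k < n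
instance (A : List Int) (n : Int) (k : Int) : Decidable (D_removeDuplicatesHelper A n k) := by
  unfold D_removeDuplicatesHelper; infer_instance

def Spec_removeDuplicatesHelper (A : List Int) (n : Int) (k : Int) (out : Int) : Prop :=
  ¬ D_removeDuplicatesHelper A n k → out = removeDuplicatesHelper_alt A n k
instance (A : List Int) (n : Int) (k : Int) (out : Int) : Decidable (Spec_removeDuplicatesHelper A n k out) := by
  unfold Spec_removeDuplicatesHelper; infer_instance

def pvDiffWitness_removeDuplicatesHelper : List Int × Int × Int := ([1, 1], 2, 0)
def pvDiffWitnessOut_removeDuplicatesHelper : Int × Int := (1, 0)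

-- ===== CLAIM (what is proved, stated in full; the proofs are below) =====
def Claim_unchanged_removeDuplicatesHelper : Prop := ∀ (A : List Int) (n : Int) (k : Int), Dom_removeDuplicatesHelper A n k → Pre_removeDuplicatesHelper A n k → Spec_removeDuplicatesHelper A n k (removeDuplicatesHelper A n k)
def Claim_changed_removeDuplicatesHelper : Prop := Dom_removeDuplicatesHelper (pvDiffWitness_removeDuplicatesHelper.1) (pvDiffWitness_removeDuplicatesHelper.2.1) (pvDiffWitness_removeDuplicatesHelper.2.2) ∧ Pre_removeDuplicatesHelper (pvDiffWitness_removeDuplicatesHelper.1) (pvDiffWitness_removeDuplicatesHelper.2.1) (pvDiffWitness_removeDuplicatesHelper.2.2) ∧ D_removeDuplicatesHelper (pvDiffWitness_removeDuplicatesHelper.1) (pvDiffWitness_removeDuplicatesHelper.2.1) (pvDiffWitness_removeDuplicatesHelper.2.2) ∧ removeDuplicatesHelper (pvDiffWitness_removeDuplicatesHelper.1) (pvDiffWitness_removeDuplicatesHelper.2.1) (pvDiffWitness_removeDuplicatesHelper.2.2) = pvDiffWitnessOut_removeDuplicatesHelper.1 ∧ removeDuplicatesHelper_alt (pvDiffWitness_removeDuplicatesHelper.1)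 (pvDiffWitness_removeDuplicatesHelper.2.1) (pvDiffWitness_removeDuplicatesHelper.2.2) = pvDiffWitnessOut_removeDuplicatesHelper.2 ∧ pvDiffWitnessOut_removeDuplicatesHelper.1 ≠ pvDiffWitnessOut_removeDuplicatesHelper.2
def Claim_exact_removeDuplicatesHelper : Prop := ∀ (A : List Int) (n : Int) (k : Int), Dom_removeDuplicatesHelper A n k → Pre_removeDuplicatesHelper A n k → D_removeDuplicatesHelper A n k → removeDuplicatesHelper A n k ≠ removeDuplicatesHelper_alt A n k

-- ===== LEMMAS AND PROOFS =====

-- pure shadow of aStep: only (lengthIndex, cnt), reading the ORIGINAL list A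
def pStep (A : List Int) (k : Int) (st : Int × Int) (j : Int) : Int × Int :=
  if pvGet A j ≠ pvGet A (j - 1) then (st.1 + 1, 1)
  else if st.2 < k then (st.1 + 1, st.2 + 1) else st

theorem pvGet_set (l : List Int) (p : Nat) (v : Int) (i : Int) (h : 0 ≤ i) :
    pvGet (l.set p v) i = if i = (p : Int) ∧ p < l.length then v else pvGet l i := by
  simp only [pvGet, PySem.List.pyGetD, PySem.List.pyGet?_of_nonneg _ h, List.getElem?_set]
  by_cases hpi : p = i.toNat
  · rw [if_pos hpi]
    by_cases hpl : p < l.length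
    · rw [if_pos hpl, if_pos (show i = (p : Int) ∧ p < l.length by omega)]
      rfl
    · rw [if_neg hpl, if_neg (show ¬ (i = (p : Int) ∧ p < l.length) by omega),
        List.getElem?_eq_none (by omega)]
  · rw [if_neg hpi, if_neg (show ¬ (i = (p : Int) ∧ p < l.length) by omega)]

theorem findEndF_ge (A : List Int) (n i : Int) :
    ∀ (fuel : Nat) (r : Int), r ≤ findEndF A n i fuel r := by
  intro fuel
  induction fuel with
  | zero => intro r; simp [findEndF]
  | succ f ih =>
    intro r; simp only [findEndF]
    split
    · exact le_trans (by omega) (ih (r + 1))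
    · exact le_refl r

theorem findEnd_ge (A : List Int) (n i r : Int) : r ≤ findEnd A n i r :=
  findEndF_ge A n i _ r

theorem findEndF_le (A : List Int) (n i : Int) :
    ∀ (fuel : Nat) (r : Int), r ≤ n → findEndF A n i fuel r ≤ n := by
  intro fuel
  induction fuel with
  | zero => intro r hr; simpa [findEndF] using hr
  | succ f ih =>
    intro r hr; simp only [findEndF]
    split
    · next h => exact ih (r + 1) (by omega)
    · exact hr

theorem findEnd_le (A : List Int) (n i r : Int) (hr : r ≤ n) : findEnd A n i r ≤ n :=
  findEndF_le A n i _ r hr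

theorem findEndF_eq_on (A : List Int) (n i : Int) :
    ∀ (fuel : Nat) (r : Int) (j : Int), r ≤ j → j < findEndF A n i fuel r →
      pvGet A j = pvGet A i := by
  intro fuel
  induction fuel with
  | zero => intro r j h1 h2; simp [findEndF] at h2; omega
  | succ f ih =>
    intro r j h1 h2; simp only [findEndF] at h2
    split at h2
    · next h =>
      rcases eq_or_lt_of_le h1 with rfl | hlt
      · exact h.2
      · exact ih (r + 1) j (by omega) h2
    · omega

theorem findEnd_eq_on (A : List Int) (n i r j : Int) (h1 : r ≤ j) (h2 : j < findEnd A n i r) :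
    pvGet A j = pvGet A i :=
  findEndF_eq_on A n i _ r j h1 h2

theorem findEndF_stop (A : List Int) (n i : Int) :
    ∀ (fuel : Nat) (r : Int), n ≤ r + fuel → r ≤ n →
      findEndF A n i fuel r = n ∨
        (findEndF A n i fuel r < n ∧ pvGet A (findEndF A n i fuel r) ≠ pvGet A i) := by
  intro fuel
  induction fuel with
  | zero => intro r h1 h2; left; simp only [findEndF]; omega
  | succ f ih =>
    intro r h1 h2; simp only [findEndF]
    split
    · next h => exact ih (r + 1) (by omega) (by omega)
    · next h =>
      by_cases hr : r < n
      · right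
        refine ⟨hr, ?_⟩
        intro he; exact h ⟨hr, he⟩
      · left; omega

theorem findEnd_stop (A : List Int) (n i r : Int) (hr : r ≤ n) :
    findEnd A n i r = n ∨ (findEnd A n i r < n ∧ pvGet A (findEnd A n i r) ≠ pvGet A i) :=
  findEndF_stop A n i _ r (by omega) hr

-- the fuel only needs to dominate the remaining iteration count
theorem keptFromF_mono (A : List Int) (n k : Int) :
    ∀ (f1 f2 : Nat) (i : Int), (n - i).toNat ≤ f1 → (n - i).toNat ≤ f2 →
      keptFromF A n k f1 i = keptFromF A n k f2 i := by
  intro f1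
  induction f1 with
  | zero =>
    intro f2 i h1 _
    have hn : ¬ i < n := by omega
    cases f2 with
    | zero => rfl
    | succ f => simp only [keptFromF]; rw [if_neg hn]
  | succ f ih =>
    intro f2 i h1 h2
    cases f2 with
    | zero =>
      have hn : ¬ i < n := by omega
      simp only [keptFromF]; rw [if_neg hn]
    | succ f' =>
      simp only [keptFromF]
      by_cases hn : i < n
      · rw [if_pos hn, if_pos hn]
        have hge := findEnd_ge A n i (i + 1)
        rw [ih f' (findEnd A n i (i + 1)) (by omega) (by omega)]
      · rw [if_neg hn, if_neg hn]

-- keptFrom satisfies the recursion of Source B's outer while loop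
theorem keptFrom_eq (A : List Int) (n k i : Int) :
    keptFrom A n k i =
      if i < n then
        List.replicate (min (findEnd A n i (i + 1) - i) k).toNat (pvGet A i)
          ++ keptFrom A n k (findEnd A n i (i + 1))
      else [] := by
  unfold keptFrom
  by_cases hn : i < n
  · have h1 : (n - i).toNat = ((n - i).toNat - 1) + 1 := by omega
    rw [h1]; simp only [keptFromF]; rw [if_pos hn, if_pos hn]
    have hge := findEnd_ge A n i (i + 1)
    rw [keptFromF_mono A n k ((n - i).toNat - 1) ((n - findEnd A n i (i + 1)).toNat)
      (findEnd A n i (i + 1)) (by omega) (by omega)]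
  · have h0 : (n - i).toNat = 0 := by omega
    rw [h0]; simp only [keptFromF]; rw [if_neg hn]

-- A's loop never changes the list at or beyond the read frontier, so it projects to pStep
theorem fold_aStep_eq_pStep (A : List Int) (k b : Int) :
    ∀ (fuel : Nat) (m : Int) (arr : List Int) (li cnt : Int),
      (b - m).toNat ≤ fuel → 1 ≤ li → li ≤ m →
      (∀ i : Int, m - 1 ≤ i → pvGet arr i = pvGet A i) →
      ((PySem.List.pyRange m b 1).foldl (aStep k) (arr, li, cnt)).2.1
        = ((PySem.List.pyRange m b 1).foldl (pStep A k) (li, cnt)).1 := by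
  intro fuel
  induction fuel with
  | zero =>
    intro m arr li cnt hf _ _ _
    rw [PySem.List.pyRange_one_eq_nil (by omega)]
    rfl
  | succ f ih =>
    intro m arr li cnt hf hli1 hli2 hinv
    by_cases hm : m < b
    · rw [PySem.List.pyRange_one_cons hm]
      simp only [List.foldl_cons]
      have e1 : pvGet arr m = pvGet A m := hinv m (by omega)
      have e2 : pvGet arr (m - 1) = pvGet A (m - 1) := hinv (m - 1) (by omega)
      have hset : ∀ i : Int, (m + 1) - 1 ≤ i →
          pvGet (arr.set li.toNat (pvGet A m)) i = pvGet A i := by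
        intro i hi
        rw [pvGet_set arr li.toNat (pvGet A m) i (by omega)]
        split_ifs with hc
        · have him : i = m := by omega
          rw [him]
        · exact hinv i (by omega)
      simp only [aStep, pStep, e1, e2]
      by_cases hne : pvGet A m ≠ pvGet A (m - 1)
      · rw [if_pos hne, if_pos hne]
        exact ih (m + 1) _ (li + 1) 1 (by omega) (by omega) (by omega) hset
      · rw [if_neg hne, if_neg hne]
        by_cases hc : cnt < k
        · rw [if_pos hc, if_pos hc]
          exact ih (m + 1) _ (li + 1) (cnt + 1) (by omega) (by omega) (by omega) hset
        · rw [if_neg hc, if_neg hc]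
          exact ih (m + 1) arr li cnt (by omega) (by omega) (by omega)
            (fun i hi => hinv i (by omega))
    · rw [PySem.List.pyRange_one_eq_nil (by omega)]
      rfl

-- an all-equal stretch of pStep steps: lengthIndex gains min(t, k - c), cnt saturates at k
theorem fold_pStep_run (A : List Int) (k : Int) :
    ∀ (t : Nat) (a c li : Int), 1 ≤ c → c ≤ k →
      (∀ j : Int, a - 1 ≤ j → j < a + t → pvGet A j = pvGet A (a - 1)) →
      (PySem.List.pyRange a (a + (t : Int)) 1).foldl (pStep A k) (li, c)
        = (li + min (t : Int) (k - c), min (c + t) k) := by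
  intro t
  induction t with
  | zero =>
    intro a c li hc1 hc2 _
    rw [show a + ((0 : Nat) : Int) = a by push_cast; ring,
      PySem.List.pyRange_one_eq_nil (le_refl a)]
    simp only [List.foldl_nil, Prod.mk.injEq]
    constructor <;> omega
  | succ t ih =>
    intro a c li hc1 hc2 heq
    have hcons : a < a + ((t + 1 : Nat) : Int) := by push_cast; omega
    rw [PySem.List.pyRange_one_cons hcons]
    simp only [List.foldl_cons]
    have hga : pvGet A a = pvGet A (a - 1) := heq a (by omega) (by push_cast; omega)
    have hstep : ∀ st : Int × Int, pStep A k st a =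
        if st.2 < k then (st.1 + 1, st.2 + 1) else st := by
      intro st; simp only [pStep]; rw [if_neg (by simp [hga])]
    rw [hstep (li, c)]
    have hrng : a + ((t + 1 : Nat) : Int) = (a + 1) + (t : Int) := by push_cast; ring
    rw [hrng]
    have heq' : ∀ j : Int, (a + 1) - 1 ≤ j → j < (a + 1) + (t : Nat) →
        pvGet A j = pvGet A ((a + 1) - 1) := by
      intro j h1 h2
      have : pvGet A j = pvGet A (a - 1) := heq j (by omega) (by push_cast at h2 ⊢; omega)
      rw [this, ← hga]
      norm_num
    by_cases hc : c < k
    · rw [if_pos hc, ih (a + 1) (c + 1) (li + 1) (by omega) (by omega) heq']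
      simp only [Prod.mk.injEq]
      push_cast
      constructor <;> omega
    · rw [if_neg hc, ih (a + 1) c li (by omega) (by omega) heq']
      simp only [Prod.mk.injEq]
      push_cast
      constructor <;> omega

-- main pure lemma: A's pure loop started at a run start computes B's kept length
theorem fold_pStep_eq_keptFrom (A : List Int) (n k : Int) (hk : 1 ≤ k) :
    ∀ (fuel : Nat) (i li : Int), (n - i).toNat ≤ fuel → 0 ≤ i → i < n →
      ((PySem.List.pyRange (i + 1) n 1).foldl (pStep A k) (li, 1)).1
        = li - 1 + ((keptFrom A n k i).length : Int) := by
  intro fuel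
  induction fuel with
  | zero => intro i li hf _ hin; omega
  | succ f ih =>
    intro i li hf hi0 hin
    have h1 : i + 1 ≤ findEnd A n i (i + 1) := findEnd_ge A n i (i + 1)
    have h2 : findEnd A n i (i + 1) ≤ n := findEnd_le A n i (i + 1) (by omega)
    set e := findEnd A n i (i + 1) with he
    have heq : ∀ j : Int, i ≤ j → j < e → pvGet A j = pvGet A i := by
      intro j hj1 hj2
      rcases eq_or_lt_of_le hj1 with rfl | hlt
      · rfl
      · exact findEnd_eq_on A n i (i + 1) j (by omega) hj2
    rw [PySem.List.pyRange_one_append (i + 1) e n h1 h2, List.foldl_append]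
    have ht : ((e - (i + 1)).toNat : Int) = e - i - 1 := by omega
    have hrng : e = (i + 1) + (((e - (i + 1)).toNat : Nat) : Int) := by omega
    rw [show PySem.List.pyRange (i + 1) e 1
        = PySem.List.pyRange (i + 1) ((i + 1) + (((e - (i + 1)).toNat : Nat) : Int)) 1 by
      rw [← hrng]]
    have heq' : ∀ j : Int, (i + 1) - 1 ≤ j → j < (i + 1) + (((e - (i + 1)).toNat : Nat) : Int) →
        pvGet A j = pvGet A ((i + 1) - 1) := by
      intro j hj1 hj2
      have hji : pvGet A j = pvGet A i := heq j (by omega) (by omega)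
      have hii : (i + 1) - 1 = i := by ring
      rw [hji, hii]
    rw [fold_pStep_run A k ((e - (i + 1)).toNat) (i + 1) 1 li (le_refl 1) hk heq']
    have hM1 : 1 ≤ min (e - i) k := by omega
    have hpair : (li + min (((e - (i + 1)).toNat : Nat) : Int) (k - 1),
        min (1 + (((e - (i + 1)).toNat : Nat) : Int)) k) = (li + min (e - i) k - 1, min (e - i) k) := by
      simp only [Prod.mk.injEq]
      constructor <;> omega
    rw [hpair]
    rw [keptFrom_eq A n k i, if_pos hin, ← he]
    rcases findEnd_stop A n i (i + 1) (by omega) with hstop | ⟨hlt, hne⟩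
    · rw [← he] at hstop
      rw [hstop, PySem.List.pyRange_one_eq_nil (le_refl n)]
      rw [keptFrom_eq A n k n, if_neg (by omega)]
      simp only [List.foldl_nil, List.length_append, List.length_replicate, List.length_nil]
      omega
    · rw [← he] at hlt hne
      rw [PySem.List.pyRange_one_cons hlt]
      simp only [List.foldl_cons]
      have hgem1 : pvGet A (e - 1) = pvGet A i := heq (e - 1) (by omega) (by omega)
      have hstepe : pStep A k (li + min (e - i) k - 1, min (e - i) k) e
          = (li + min (e - i) k, 1) := by
        simp only [pStep]
        rw [if_pos (by rw [hgem1]; exact hne)]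
        simp only [Prod.mk.injEq]
        exact ⟨by omega, trivial⟩
      rw [hstepe]
      rw [ih e (li + min (e - i) k) (by omega) (by omega) hlt]
      simp only [List.length_append, List.length_replicate]
      push_cast
      omega

-- A's loop never decreases lengthIndex
theorem fold_aStep_li_ge (k : Int) :
    ∀ (l : List Int) (st : List Int × Int × Int), st.2.1 ≤ (l.foldl (aStep k) st).2.1 := by
  intro l
  induction l with
  | nil => intro st; simp
  | cons x xs ih =>
    intro st
    have h2 := ih (aStep k st x)
    have h1 : st.2.1 ≤ (aStep k st x).2.1 := by
      unfold aStep; split_ifs <;> simp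
    simpa using le_trans h1 h2

theorem keptFromF_nil_of_nonpos (A : List Int) (n k : Int) (hk : k ≤ 0) :
    ∀ (fuel : Nat) (i : Int), keptFromF A n k fuel i = [] := by
  intro fuel
  induction fuel with
  | zero => intro i; rfl
  | succ f ih =>
    intro i
    simp only [keptFromF]
    split
    · have h0 : (min (findEnd A n i (i + 1) - i) k).toNat = 0 := by omega
      rw [h0, ih]
      rfl
    · rfl

-- ===== VERDICT (by name: the statement is the Claim_ definition above) =====
theorem removeDuplicatesHelper_spec : Claim_unchanged_removeDuplicatesHelper := by
  intro A n k _ hPre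
  unfold Spec_removeDuplicatesHelper
  intro hnD
  by_cases hnk : n ≤ k
  · unfold removeDuplicatesHelper removeDuplicatesHelper_alt
    rw [if_pos hnk, if_pos hnk]
  · have hkn : k < n := by omega
    have hk1 : 1 ≤ k := by
      unfold D_removeDuplicatesHelper at hnD
      by_contra h
      exact hnD ⟨by omega, hkn⟩
    unfold removeDuplicatesHelper removeDuplicatesHelper_alt
    rw [if_neg hnk, if_neg hnk]
    rw [fold_aStep_eq_pStep A k n ((n - 1).toNat) 1 A 1 1 (by omega) (le_refl 1) (le_refl 1)
      (fun i _ => rfl)]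
    have h01 := fold_pStep_eq_keptFrom A n k hk1 ((n - 0).toNat) 0 1 (le_refl _) (le_refl 0)
      (by omega)
    rw [show (0 : Int) + 1 = 1 by norm_num] at h01
    rw [h01]
    omega

theorem removeDuplicatesHelper_changed : Claim_changed_removeDuplicatesHelper := by
  unfold Claim_changed_removeDuplicatesHelper
  decide

theorem removeDuplicatesHelper_tight : Claim_exact_removeDuplicatesHelper := by
  intro A n k _ _ hD
  obtain ⟨hk0, hkn⟩ := hD
  have hA1 : 1 ≤ removeDuplicatesHelper A n k := by
    unfold removeDuplicatesHelper
    rw [if_neg (by omega)]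
    simpa using fold_aStep_li_ge k (PySem.List.pyRange 1 n 1) (A, 1, 1)
  have hB0 : removeDuplicatesHelper_alt A n k = 0 := by
    unfold removeDuplicatesHelper_alt keptFrom
    rw [if_neg (by omega), keptFromF_nil_of_nonpos A n k hk0]
    rfl
  omega
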